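-- pv_equiv track=rewrite | github.com/HeitorRoriz/skyt_experiment | src/canon.py | _strip_comments
-- ===== SOURCE A (Python) =====
-- def _strip_comments(code: str) -> str:
--     """Remove Python comments from code"""
--     lines = code.split('\n')
--     cleaned_lines = []
--
--     for line in lines:
--         # Simple comment removal (doesn't handle strings with # correctly)
--         if '#' in line:
--             line = line[:line.index('#')]
--         cleaned_lines.append(line.rstrip())
--
--     return '\n'.join(cleaned_lines)
-- ===== SOURCE B (Python) =====
-- def _strip_comments(code: str) -> str:
--     """Remove Python comments from code"""
--     # Pass 1: one global character scan cuts every '#'-to-end-of-line span.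
--     out = []
--     skipping = False
--     for ch in code:
--         if ch == '\n':
--             skipping = False
--             out.append(ch)
--         elif ch == '#':
--             skipping = True
--         elif not skipping:
--             out.append(ch)
--     # Pass 2: trim trailing whitespace per line.
--     return '\n'.join(line.rstrip() for line in ''.join(out).split('\n'))
-- ===== Notes on version B (the rewrite author's own statement) =====
-- stated objective: alternative
-- what changed: Replaced the fused per-line loop (split, '#' membership test, index/slice, rstrip, accumulate) by two separately-shaped passes: a single global state-machine character scan that deletes every '#'-to-end-of-line span, followed by a declarative split/rstrip/join trimming pass.
import Mathlib
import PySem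

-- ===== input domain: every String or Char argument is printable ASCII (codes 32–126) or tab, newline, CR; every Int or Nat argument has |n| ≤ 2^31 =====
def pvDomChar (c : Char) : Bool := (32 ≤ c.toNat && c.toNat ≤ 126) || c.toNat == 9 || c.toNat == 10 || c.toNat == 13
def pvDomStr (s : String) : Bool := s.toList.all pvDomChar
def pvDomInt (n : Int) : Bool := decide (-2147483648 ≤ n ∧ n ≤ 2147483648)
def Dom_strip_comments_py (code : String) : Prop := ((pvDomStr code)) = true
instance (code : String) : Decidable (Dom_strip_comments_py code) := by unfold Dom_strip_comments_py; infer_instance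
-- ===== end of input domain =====

-- B replaces A's fused per-line loop by a global '#'-to-newline cutting scan plus a split/rstrip/join trimming pass (alternative decomposition, same cost).


-- ===== PORT A =====
-- A: split on '\n'; per line, if '#' occurs cut at its first index (under the
-- '#' in line guard, line.index('#') = Chars.find line ['#']), rstrip, accumulate; join.
def strip_comments_py (code : String) : String :=
  let lines := PySem.Chars.splitOn code.toList ['\n']
  let cleaned_lines := lines.foldl (fun acc line =>
    let line' := if PySem.Chars.isIn ['#'] line
                 then PySem.Chars.slice line none (some (PySem.Chars.find line ['#']))
                 else line
    acc ++ [PySem.Chars.rstrip line']) []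
  String.ofList (PySem.Chars.join ['\n'] cleaned_lines)

-- ===== PORT B =====
-- B pass 1: the global state-machine scan over the characters.
def pvCut : List Char → Bool → List Char
  | [], _ => []
  | c :: rest, skip =>
    if c = '\n' then c :: pvCut rest false
    else if c = '#' then pvCut rest true
    else if skip then pvCut rest skip
    else c :: pvCut rest skip

def strip_comments_py_alt (code : String) : String :=
  let cleaned := pvCut code.toList false
  let lines := PySem.Chars.splitOn cleaned ['\n']
  String.ofList (PySem.Chars.join ['\n'] (lines.map PySem.Chars.rstrip))

-- ===== PRECONDITION & SPEC =====
def Spec_strip_comments_py (code : String) (out : String) : Prop := out = strip_comments_py_alt code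
instance (code : String) (out : String) : Decidable (Spec_strip_comments_py code out) := by unfold Spec_strip_comments_py; infer_instance

-- ===== CLAIM (what is proved, stated in full; the proofs are below) =====
def Claim_equal_strip_comments_py : Prop := ∀ (code : String), Dom_strip_comments_py code → Spec_strip_comments_py code (strip_comments_py code)

-- ===== LEMMAS AND PROOFS =====


-- One-step equations for PySem.Chars.splitOn.go at separator ['\n'].
theorem pvGo_nil (fuel : Nat) (cur : List Char) (acc : List (List Char)) :
    PySem.Chars.splitOn.go ['\n'] (fuel+1) [] cur acc = (cur.reverse :: acc).reverse := by
  rw [PySem.Chars.splitOn.go]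
  simp

theorem pvGo_nl (r : List Char) (fuel : Nat) (cur : List Char) (acc : List (List Char)) :
    PySem.Chars.splitOn.go ['\n'] (fuel+1) ('\n' :: r) cur acc
      = PySem.Chars.splitOn.go ['\n'] fuel r [] (cur.reverse :: acc) := by
  rw [PySem.Chars.splitOn.go]
  simp [List.isPrefixOf]

theorem pvGo_other {c : Char} (h : c ≠ '\n') (r : List Char) (fuel : Nat) (cur : List Char) (acc : List (List Char)) :
    PySem.Chars.splitOn.go ['\n'] (fuel+1) (c :: r) cur acc
      = PySem.Chars.splitOn.go ['\n'] fuel r (c :: cur) acc := by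
  rw [PySem.Chars.splitOn.go]
  simp [List.isPrefixOf, Ne.symm h]

-- Clean recursive characterisation of splitting on '\n': (first line, later lines).
def pvSplitNL : List Char → List Char × List (List Char)
  | [] => ([], [])
  | c :: r =>
    if c = '\n' then ([], (pvSplitNL r).1 :: (pvSplitNL r).2)
    else (c :: (pvSplitNL r).1, (pvSplitNL r).2)

theorem pvGo_eq (l : List Char) : ∀ (fuel : Nat) (cur : List Char) (acc : List (List Char)),
    l.length < fuel →
    PySem.Chars.splitOn.go ['\n'] fuel l cur acc
      = acc.reverse ++ (cur.reverse ++ (pvSplitNL l).1) :: (pvSplitNL l).2 := by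
  induction l with
  | nil =>
    intro fuel cur acc h
    obtain ⟨f, rfl⟩ : ∃ f, fuel = f + 1 := ⟨fuel - 1, by omega⟩
    rw [pvGo_nil]
    simp [pvSplitNL]
  | cons c r ih =>
    intro fuel cur acc h
    obtain ⟨f, rfl⟩ : ∃ f, fuel = f + 1 := ⟨fuel - 1, by omega⟩
    by_cases hc : c = '\n'
    · subst hc
      rw [pvGo_nl, ih f [] (cur.reverse :: acc) (by simp at h; omega)]
      simp [pvSplitNL]
    · rw [pvGo_other hc, ih f (c :: cur) acc (by simp at h; omega)]
      simp [pvSplitNL, hc]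

theorem pvSplitOn_eq (l : List Char) :
    PySem.Chars.splitOn l ['\n'] = (pvSplitNL l).1 :: (pvSplitNL l).2 := by
  simp [PySem.Chars.splitOn, pvGo_eq l (l.length + 1) [] [] (by omega)]

-- The cutting scan commutes with line splitting: it truncates each line at its first '#'.
theorem pvCut_splitNL (l : List Char) :
    pvSplitNL (pvCut l false)
      = ((pvSplitNL l).1.takeWhile (· ≠ '#'), (pvSplitNL l).2.map (List.takeWhile (· ≠ '#')))
    ∧ pvSplitNL (pvCut l true)
      = ([], (pvSplitNL l).2.map (List.takeWhile (· ≠ '#'))) := by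
  induction l with
  | nil => simp [pvCut, pvSplitNL]
  | cons c r ih =>
    by_cases h1 : c = '\n'
    · subst h1
      constructor <;> simp [pvCut, pvSplitNL, ih.1]
    · by_cases h2 : c = '#'
      · subst h2
        constructor <;> simp [pvCut, pvSplitNL, h1, ih.2]
      · constructor <;> simp [pvCut, pvSplitNL, h1, h2, ih.1, ih.2]


-- take up to the first index holding '#' is takeWhile (· ≠ '#').
theorem pvTake_eq_takeWhile : ∀ (l : List Char) (k : Nat),
    l[k]? = some '#' → (∀ i, i < k → l[i]? ≠ some '#') →
    l.take k = l.takeWhile (· ≠ '#') := by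
  intro l
  induction l with
  | nil => intro k hk _; simp at hk
  | cons c r ih =>
    intro k hk hlt
    match k with
    | 0 =>
      simp at hk
      simp [hk]
    | k+1 =>
      have hc : c ≠ '#' := fun hcc => hlt 0 (by omega) (by simp [hcc])
      simp only [List.take_succ_cons, List.takeWhile_cons]
      simp only [hc, decide_not, ne_eq, not_false_eq_true]
      rw [ih k (by simpa using hk) (fun i hi => by simpa using hlt (i+1) (by omega))]
      simp

-- A's conditional find/slice on one line is exactly takeWhile (· ≠ '#').
theorem pvLineA (line : List Char) :
    (if PySem.Chars.isIn ['#'] line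
     then PySem.Chars.slice line none (some (PySem.Chars.find line ['#']))
     else line) = line.takeWhile (· ≠ '#') := by
  by_cases h : PySem.Chars.isIn ['#'] line
  · have hinf : ['#'] <:+: line := (PySem.Chars.isIn_iff_infix _ _).mp h
    have hnn : 0 ≤ PySem.Chars.find line ['#'] := (PySem.Chars.find_nonneg_iff _ _).mpr hinf
    obtain ⟨hpre, hmin⟩ := PySem.Chars.find_spec hnn
    rw [if_pos h,
      show PySem.Chars.slice line none (some (PySem.Chars.find line ['#']))
          = PySem.List.slice line none (some (PySem.Chars.find line ['#'])) from rfl,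
      PySem.List.slice_to line hnn]
    apply pvTake_eq_takeWhile
    · obtain ⟨t, ht⟩ := hpre
      have h0 : (line.drop (PySem.Chars.find line ['#']).toNat)[0]? = some '#' := by
        rw [← ht]; rfl
      simpa [List.getElem?_drop] using h0
    · intro i hi hsome
      apply hmin i hi
      have h0 : (line.drop i)[0]? = some '#' := by simpa [List.getElem?_drop] using hsome
      cases hd : line.drop i with
      | nil => rw [hd] at h0; simp at h0
      | cons a t =>
        rw [hd] at h0
        simp at h0
        exact ⟨t, by simp [h0]⟩
  · rw [if_neg h]
    have hninf : ¬ ['#'] <:+: line := by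
      intro hc; exact h ((PySem.Chars.isIn_iff_infix _ _).mpr hc)
    have hmem : '#' ∉ line := fun hm => hninf ((List.singleton_infix_iff _ _).mpr hm)
    symm
    refine List.takeWhile_eq_self_iff.mpr (fun x hx => ?_)
    simp only [decide_eq_true_eq, ne_eq]
    intro hxe
    exact hmem (hxe ▸ hx)

-- ===== VERDICT (by name: the statement is the Claim_ definition above) =====
theorem strip_comments_py_spec : Claim_equal_strip_comments_py := by
  intro code _
  show strip_comments_py code = strip_comments_py_alt code
  unfold strip_comments_py strip_comments_py_alt
  simp only []
  rw [PySem.List.foldl_append_singleton_eq_map]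
  rw [pvSplitOn_eq, pvSplitOn_eq, (pvCut_splitNL code.toList).1]
  simp only [List.map_cons, List.map_map, pvLineA, Function.comp_def, List.nil_append]
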